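-- pv_equiv track=rewrite | github.com/ldovg777-art/Node-red | add_link_call_nodes.py | find_end_nodes
-- ===== SOURCE A (Python) =====
-- def find_end_nodes(data, start_node_ids, nodes_dict):
--     """Находит конечные ноды в цепочке (ноды без исходящих связей в этой группе)"""
--     visited = set()
--     end_nodes = []
--
--     def traverse(node_id):
--         if node_id in visited or node_id not in nodes_dict:
--             return
--         visited.add(node_id)
--
--         node = nodes_dict[node_id]
--         wires = node.get('wires', [])
--
--         # Проверяем, есть ли исходящие связи к другим нодам в группе
--         has_outgoing_in_group = False
--         for wire_list in wires:
--             for target_id in wire_list: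
--                 if target_id in start_node_ids:
--                     has_outgoing_in_group = True
--                     traverse(target_id)
--
--         # Если нет исходящих связей в группе, это конечная нода
--         if not has_outgoing_in_group:
--             end_nodes.append(node_id)
--
--     for start_id in start_node_ids:
--         traverse(start_id)
--
--     return end_nodes if end_nodes else start_node_ids
-- ===== SOURCE B (Python) =====
-- def find_end_nodes(data, start_node_ids, nodes_dict):
--     """Iterative DFS with an explicit stack instead of recursion (same result, no recursion depth limit)."""
--     visited = set()
--     end_nodes = []
--     for start_id in start_node_ids:
--         stack = [start_id]
--         while stack:
--             node_id = stack.pop()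
--             if node_id in visited or node_id not in nodes_dict:
--                 continue
--             visited.add(node_id)
--             wires = nodes_dict[node_id].get('wires', [])
--             targets = [t for wl in wires for t in wl if t in start_node_ids]
--             if not targets:
--                 end_nodes.append(node_id)
--             stack.extend(reversed(targets))
--     return end_nodes if end_nodes else start_node_ids
-- ===== Notes on version B (the rewrite author's own statement) =====
-- stated objective: alternative
-- what changed: A's recursive DFS closure (traverse) is replaced by an iterative DFS with an explicit stack: each start id seeds a stack, nodes are popped, skipped if visited/unknown, their in-group wire targets collected once per node and pushed reversed so pop order reproduces A's recursive discovery order; sinks are appended on pop.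
import Mathlib
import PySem

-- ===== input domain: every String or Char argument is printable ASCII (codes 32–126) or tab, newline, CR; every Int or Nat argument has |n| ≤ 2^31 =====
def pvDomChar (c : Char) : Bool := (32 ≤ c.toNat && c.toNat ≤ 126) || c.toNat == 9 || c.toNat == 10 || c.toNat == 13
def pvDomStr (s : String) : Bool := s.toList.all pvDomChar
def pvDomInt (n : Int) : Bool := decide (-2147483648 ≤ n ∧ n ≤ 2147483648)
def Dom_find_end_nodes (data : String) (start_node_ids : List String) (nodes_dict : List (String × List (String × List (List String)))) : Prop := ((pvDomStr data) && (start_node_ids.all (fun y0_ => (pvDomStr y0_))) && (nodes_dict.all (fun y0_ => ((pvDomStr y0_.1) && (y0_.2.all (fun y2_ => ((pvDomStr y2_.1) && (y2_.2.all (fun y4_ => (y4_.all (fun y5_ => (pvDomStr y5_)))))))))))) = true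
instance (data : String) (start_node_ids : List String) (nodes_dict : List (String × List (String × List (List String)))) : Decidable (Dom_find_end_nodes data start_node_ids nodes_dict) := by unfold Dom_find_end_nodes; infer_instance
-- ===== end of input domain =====

-- B replaces A's recursive DFS by an iterative DFS with an explicit stack (same return value; alternative decomposition, no recursion).

-- ===== PORT A =====
-- A's recursive `traverse` closure, threading the mutated state (visited, end_nodes).
-- The Nat argument is a fuel guard only (recursion depth is bounded by the number of
-- distinct dict keys, so the fuel `nodes_dict.length + 1` supplied below is never exhausted;
-- the equivalence theorem proves the fueled computation equals the fuel-free B).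
def travA (nd : PySem.Dict String (List (String × List (List String)))) (sns : List String) :
    Nat → PySem.Set String → List String → String → PySem.Set String × List String
  | 0, v, e, _ => (v, e)
  | f+1, v, e, nid =>
    -- if node_id in visited or node_id not in nodes_dict: return
    if PySem.Set.contains v nid || !(PySem.Dict.contains nd nid) then (v, e)
    else
      let v1 := PySem.Set.add v nid
      let node := (PySem.Dict.get? nd nid).getD []   -- guard above ensures the key is present
      let wires := PySem.Dict.getD (PySem.Dict.mk node) "wires" []
      -- for wire_list in wires: for target_id in wire_list: …  (state = (has_outgoing_in_group, visited, end_nodes))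
      let st := wires.foldl
        (fun (a : Bool × PySem.Set String × List String) wire_list =>
          wire_list.foldl
            (fun (a : Bool × PySem.Set String × List String) t =>
              if t ∈ sns then (true, travA nd sns f a.2.1 a.2.2 t) else a) a)
        (false, v1, e)
      if !st.1 then (st.2.1, st.2.2 ++ [nid]) else (st.2.1, st.2.2)

def find_end_nodes (data : String) (start_node_ids : List String) (nodes_dict : List (String × List (String × List (List String)))) : List String :=
  let nd := PySem.Dict.mk nodes_dict
  let p := start_node_ids.foldl
    (fun (s : PySem.Set String × List String) start_id =>
      travA nd start_node_ids (nodes_dict.length + 1) s.1 s.2 start_id)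
    (PySem.Set.empty, [])
  if p.2.isEmpty then start_node_ids else p.2

-- ===== PORT B =====
-- helper: the comprehension `[t for wl in wires for t in wl if t in start_node_ids]`
def tsOf (nd : PySem.Dict String (List (String × List (List String)))) (sns : List String) (nid : String) : List String :=
  let wires := PySem.Dict.getD (PySem.Dict.mk ((PySem.Dict.get? nd nid).getD [])) "wires" []
  wires.flatten.filter (fun t => decide (t ∈ sns))

-- termination measure for the stack loop: number of not-yet-visited distinct dict keys
def countU (ndl : List (String × List (String × List (List String)))) (v : PySem.Set String) : Nat :=
  ((PySem.List.dedup (ndl.map Prod.fst)).filter (fun k => !(PySem.Set.contains v k))).length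

lemma length_filter_lt {α : Type} {l : List α} {p q : α → Bool}
    (h : ∀ a, p a = true → q a = true) {x : α} (hx : x ∈ l)
    (hqx : q x = true) (hpx : p x = false) :
    (l.filter p).length < (l.filter q).length := by
  induction l with
  | nil => cases hx
  | cons a l ih =>
    rcases List.mem_cons.mp hx with rfl | hmem
    · simp only [List.filter_cons, hpx, hqx, Bool.false_eq_true, if_false, if_true,
        List.length_cons]
      exact Nat.lt_succ_of_le (List.monotone_filter_right l h).length_le
    · by_cases hpa : p a = true
      · simp only [List.filter_cons, hpa, h a hpa, if_true, List.length_cons]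
        exact Nat.succ_lt_succ (ih hmem)
      · by_cases hqa : q a = true <;>
          simp only [List.filter_cons, hpa, hqa, Bool.false_eq_true, if_false, if_true,
            List.length_cons] <;>
          [exact Nat.lt_succ_of_lt (ih hmem); exact ih hmem]

lemma countU_add_lt (ndl : List (String × List (String × List (List String))))
    (v : PySem.Set String) (x : String)
    (hmem : PySem.Dict.contains (PySem.Dict.mk ndl) x = true)
    (hnv : PySem.Set.contains v x = false) :
    countU ndl (PySem.Set.add v x) < countU ndl v := by
  have hxkeys : x ∈ ndl.map Prod.fst := by
    rw [PySem.Dict.contains_eq_decide_mem_keys, PySem.Dict.keys_mk] at hmem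
    exact of_decide_eq_true hmem
  have hxnv : x ∉ v := by
    intro hxv
    rw [(PySem.Set.contains_iff v x).mpr hxv] at hnv
    cases hnv
  refine length_filter_lt (fun a ha => ?_) ((PySem.List.mem_dedup _ _).mpr hxkeys) ?_ ?_
  · simp only [Bool.not_eq_true'] at ha ⊢
    rcases Bool.eq_false_or_eq_true (PySem.Set.contains v a) with hv | hv
    · have : a ∈ PySem.Set.add v x := (PySem.Set.mem_add _ _ _).mpr (Or.inl ((PySem.Set.contains_iff v a).mp hv))
      rw [(PySem.Set.contains_iff _ a).mpr this] at ha
      cases ha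
    · exact hv
  · simp only [hnv, Bool.not_false]
  · have : x ∈ PySem.Set.add v x := (PySem.Set.mem_add _ _ _).mpr (Or.inr rfl)
    simp only [(PySem.Set.contains_iff _ x).mpr this, Bool.not_true]

-- the while-stack loop (stack modeled with its top at the head; pushing reversed(targets)
-- onto the Python list's end = prepending targets here)
def stackB (ndl : List (String × List (String × List (List String)))) (sns : List String)
    (v : PySem.Set String) (e : List String) (stack : List String) :
    PySem.Set String × List String :=
  match stack with
  | [] => (v, e)
  | nid :: rest =>
    if h : (PySem.Set.contains v nid || !(PySem.Dict.contains (PySem.Dict.mk ndl) nid)) = true then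
      stackB ndl sns v e rest
    else
      let v1 := PySem.Set.add v nid
      let ts := tsOf (PySem.Dict.mk ndl) sns nid
      let e1 := if ts.isEmpty then e ++ [nid] else e
      stackB ndl sns v1 e1 (ts ++ rest)
termination_by (countU ndl v, stack.length)
decreasing_by
  · apply Prod.Lex.right
    simp
  · apply Prod.Lex.left
    simp only [Bool.or_eq_true, Bool.not_eq_true', not_or, Bool.not_eq_true,
      Bool.not_eq_false] at h
    exact countU_add_lt ndl v nid h.2 h.1

def find_end_nodes_alt (data : String) (start_node_ids : List String) (nodes_dict : List (String × List (String × List (List String)))) : List String :=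
  let p := start_node_ids.foldl
    (fun (s : PySem.Set String × List String) start_id =>
      stackB nodes_dict start_node_ids s.1 s.2 [start_id])
    (PySem.Set.empty, [])
  if p.2.isEmpty then start_node_ids else p.2

-- ===== PRECONDITION & SPEC =====
def Spec_find_end_nodes (data : String) (start_node_ids : List String) (nodes_dict : List (String × List (String × List (List String)))) (out : List String) : Prop := out = find_end_nodes_alt data start_node_ids nodes_dict
instance (data : String) (start_node_ids : List String) (nodes_dict : List (String × List (String × List (List String)))) (out : List String) : Decidable (Spec_find_end_nodes data start_node_ids nodes_dict out) := by unfold Spec_find_end_nodes; infer_instance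

-- ===== CLAIM (what is proved, stated in full; the proofs are below) =====
def Claim_equal_find_end_nodes : Prop := ∀ (data : String) (start_node_ids : List String) (nodes_dict : List (String × List (String × List (List String)))), Dom_find_end_nodes data start_node_ids nodes_dict → Spec_find_end_nodes data start_node_ids nodes_dict (find_end_nodes data start_node_ids nodes_dict)

-- ===== LEMMAS AND PROOFS =====

-- A's outer loop over a list of node ids (each element gets the same fuel f)
def travListA (nd : PySem.Dict String (List (String × List (List String)))) (sns : List String)
    (f : Nat) (s : PySem.Set String × List String) (l : List String) :
    PySem.Set String × List String :=
  l.foldl (fun s x => travA nd sns f s.1 s.2 x) s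

lemma stackB_nil (ndl : List (String × List (String × List (List String)))) (sns : List String)
    (v : PySem.Set String) (e : List String) : stackB ndl sns v e [] = (v, e) := by
  rw [stackB]

lemma stackB_cons (ndl : List (String × List (String × List (List String)))) (sns : List String)
    (v : PySem.Set String) (e : List String) (nid : String) (rest : List String) :
    stackB ndl sns v e (nid :: rest)
      = if (PySem.Set.contains v nid || !(PySem.Dict.contains (PySem.Dict.mk ndl) nid)) = true then
          stackB ndl sns v e rest
        else
          stackB ndl sns (PySem.Set.add v nid)
            (if (tsOf (PySem.Dict.mk ndl) sns nid).isEmpty then e ++ [nid] else e)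
            (tsOf (PySem.Dict.mk ndl) sns nid ++ rest) := by
  rw [stackB]
  split <;> rfl

-- the inner flag-setting double loop of A, flattened and characterised
lemma flagFold (nd : PySem.Dict String (List (String × List (List String)))) (sns : List String)
    (f : Nat) (l : List String) : ∀ (b : Bool) (s : PySem.Set String × List String),
    l.foldl (fun (a : Bool × PySem.Set String × List String) t =>
        if t ∈ sns then (true, travA nd sns f a.2.1 a.2.2 t) else a) (b, s)
      = (b || !((l.filter (fun t => decide (t ∈ sns))).isEmpty),
         travListA nd sns f s (l.filter (fun t => decide (t ∈ sns)))) := by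
  induction l with
  | nil => intro b s; simp [travListA]
  | cons x l ih =>
    intro b s
    by_cases hx : x ∈ sns
    · simp only [List.foldl_cons, List.filter_cons, hx, decide_true, if_true]
      rw [ih]
      simp [travListA]
    · simp only [List.foldl_cons, List.filter_cons, hx, decide_false, if_false]
      rw [ih]
      simp

lemma travA_char (nd : PySem.Dict String (List (String × List (List String)))) (sns : List String)
    (f : Nat) (v : PySem.Set String) (e : List String) (nid : String) :
    travA nd sns (f+1) v e nid
      = if (PySem.Set.contains v nid || !(PySem.Dict.contains nd nid)) = true then (v, e)
        else
          travListA nd sns f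
            (PySem.Set.add v nid,
             if (tsOf nd sns nid).isEmpty then e ++ [nid] else e)
            (tsOf nd sns nid) := by
  conv_lhs => rw [travA]
  simp only []
  rw [← List.foldl_flatten, flagFold]
  simp only [tsOf, Bool.false_or, Bool.not_not]
  by_cases hg : (PySem.Set.contains v nid || !(PySem.Dict.contains nd nid)) = true
  · rw [if_pos hg, if_pos hg]
  · rw [if_neg hg, if_neg hg]
    by_cases he : (((PySem.Dict.mk ((PySem.Dict.get? nd nid).getD [])).getD "wires" []).flatten.filter
        (fun t => decide (t ∈ sns))).isEmpty = true
    · simp only [List.isEmpty_iff.mp he]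
      simp only [travListA, List.foldl_nil, List.isEmpty_nil, if_true]
    · have he' := eq_false_of_ne_true he
      simp only [he', Bool.false_eq_true, if_false]

lemma travA_mono (nd : PySem.Dict String (List (String × List (List String)))) (sns : List String) :
    ∀ (f : Nat) (v : PySem.Set String) (e : List String) (nid k : String),
      k ∈ v → k ∈ (travA nd sns f v e nid).1 := by
  intro f
  induction f with
  | zero => intro v e nid k hk; rw [travA]; exact hk
  | succ f ih =>
    have hlist : ∀ (l : List String) (s : PySem.Set String × List String) (k : String),
        k ∈ s.1 → k ∈ (travListA nd sns f s l).1 := by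
      intro l
      induction l with
      | nil => intro s k hk; exact hk
      | cons x l ihl =>
        intro s k hk
        exact ihl _ k (ih s.1 s.2 x k hk)
    intro v e nid k hk
    rw [travA_char]
    split
    · exact hk
    · exact hlist _ _ k ((PySem.Set.mem_add _ _ _).mpr (Or.inl hk))

lemma travListA_mono (nd : PySem.Dict String (List (String × List (List String))))
    (sns : List String) (f : Nat) :
    ∀ (l : List String) (s : PySem.Set String × List String) (k : String),
      k ∈ s.1 → k ∈ (travListA nd sns f s l).1 := by
  intro l
  induction l with
  | nil => intro s k hk; exact hk
  | cons x l ihl => intro s k hk; exact ihl _ k (travA_mono nd sns f s.1 s.2 x k hk)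

lemma countU_mono (ndl : List (String × List (String × List (List String))))
    (v v' : PySem.Set String) (h : ∀ k, k ∈ v → k ∈ v') :
    countU ndl v' ≤ countU ndl v := by
  refine (List.monotone_filter_right _ (fun a ha => ?_)).length_le
  simp only [Bool.not_eq_true'] at ha ⊢
  rcases Bool.eq_false_or_eq_true (PySem.Set.contains v a) with hv | hv
  · rw [(PySem.Set.contains_iff _ a).mpr (h a ((PySem.Set.contains_iff v a).mp hv))] at ha
    cases ha
  · exact hv

lemma countU_le (ndl : List (String × List (String × List (List String))))
    (v : PySem.Set String) : countU ndl v ≤ ndl.length := by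
  calc countU ndl v ≤ (PySem.List.dedup (ndl.map Prod.fst)).length := List.length_filter_le _ _
    _ ≤ (ndl.map Prod.fst).length := by
        rw [PySem.List.dedup_eq_ofList]; exact PySem.Set.length_ofList_le _
    _ = ndl.length := List.length_map ..

-- MAIN INVARIANT: running the stack loop on l1 ++ l2 first performs exactly A's recursive
-- traversal of the ids l1 (with any sufficient fuel), then continues with l2.
lemma stackB_eq_travListA (ndl : List (String × List (String × List (List String))))
    (sns : List String) :
    ∀ (n f : Nat), n < f → ∀ (l1 : List String) (v : PySem.Set String) (e : List String)
      (l2 : List String), countU ndl v ≤ n →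
      stackB ndl sns v e (l1 ++ l2)
        = stackB ndl sns
            (travListA (PySem.Dict.mk ndl) sns f (v, e) l1).1
            (travListA (PySem.Dict.mk ndl) sns f (v, e) l1).2 l2 := by
  intro n
  induction n using Nat.strong_induction_on with
  | _ n IH =>
    intro f hf l1
    induction l1 generalizing f with
    | nil => intro v e l2 _; rfl
    | cons x l1 ihl =>
      intro v e l2 hcount
      obtain ⟨f', rfl⟩ : ∃ f', f = f' + 1 := ⟨f - 1, by omega⟩
      have hstep : travListA (PySem.Dict.mk ndl) sns (f' + 1) (v, e) (x :: l1)
          = travListA (PySem.Dict.mk ndl) sns (f' + 1)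
              (travA (PySem.Dict.mk ndl) sns (f' + 1) v e x) l1 := rfl
      by_cases hskip : (PySem.Set.contains v x || !(PySem.Dict.contains (PySem.Dict.mk ndl) x)) = true
      · rw [List.cons_append, stackB_cons, if_pos hskip, hstep, travA_char, if_pos hskip]
        exact ihl (f' + 1) hf v e l2 hcount
      · simp only [Bool.or_eq_true, Bool.not_eq_true', not_or, Bool.not_eq_true,
          Bool.not_eq_false] at hskip
        obtain ⟨hnv, hin⟩ := hskip
        have hlt : countU ndl (PySem.Set.add v x) < countU ndl v := countU_add_lt ndl v x hin hnv
        have hn1 : countU ndl (PySem.Set.add v x) ≤ n - 1 := by omega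
        have hnpos : 1 ≤ n := by omega
        have hxnv : x ∉ v := fun hx => by
          rw [(PySem.Set.contains_iff v x).mpr hx] at hnv; cases hnv
        have hneg : ¬(PySem.Set.contains v x
            || !(PySem.Dict.contains (PySem.Dict.mk ndl) x)) = true := by
          simp [hxnv, hin]
        set v1 := PySem.Set.add v x with hv1
        set ts := tsOf (PySem.Dict.mk ndl) sns x with htsdef
        set e1 := if ts.isEmpty then e ++ [x] else e with he1
        have hA : travA (PySem.Dict.mk ndl) sns (f' + 1) v e x
            = travListA (PySem.Dict.mk ndl) sns f' (v1, e1) ts := by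
          rw [travA_char, if_neg hneg]
        rw [List.cons_append, stackB_cons, if_neg hneg]
        rw [show ts ++ (l1 ++ l2) = ts ++ (l1 ++ l2) from rfl]
        have h1 := IH (n - 1) (by omega) f' (by omega) ts v1 e1 (l1 ++ l2) hn1
        rw [h1]
        set p0 := travListA (PySem.Dict.mk ndl) sns f' (v1, e1) ts with hp0
        have hp0count : countU ndl p0.1 ≤ n - 1 := by
          refine le_trans (countU_mono ndl v1 p0.1 ?_) hn1
          intro k hk
          exact travListA_mono _ sns f' ts (v1, e1) k hk
        have h2 := IH (n - 1) (by omega) (f' + 1) (by omega) l1 p0.1 p0.2 l2 hp0count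
        rw [h2, hstep, hA]

lemma fold_eq (ndl : List (String × List (String × List (List String)))) (sns : List String) :
    ∀ (l : List String) (s : PySem.Set String × List String),
      l.foldl (fun (s : PySem.Set String × List String) start_id =>
          stackB ndl sns s.1 s.2 [start_id]) s
        = l.foldl (fun (s : PySem.Set String × List String) start_id =>
            travA (PySem.Dict.mk ndl) sns (ndl.length + 1) s.1 s.2 start_id) s := by
  intro l
  induction l with
  | nil => intro s; rfl
  | cons x l ih =>
    intro s
    have h := stackB_eq_travListA ndl sns ndl.length (ndl.length + 1) (by omega)
      [x] s.1 s.2 [] (countU_le ndl s.1)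
    simp only [List.append_nil] at h
    simp only [List.foldl_cons]
    rw [h, stackB_nil]
    exact ih _

-- ===== VERDICT (by name: the statement is the Claim_ definition above) =====
theorem find_end_nodes_spec : Claim_equal_find_end_nodes := by
  unfold Claim_equal_find_end_nodes
  intro data sns ndl _
  unfold Spec_find_end_nodes find_end_nodes find_end_nodes_alt
  rw [fold_eq]
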